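-- pv_equiv track=rewrite | github.com/sasiasas/Kriptografia-2023-2024 | lab1/crypto.py | build_superincreasing_sequence
-- ===== SOURCE A (Python) =====
-- def build_superincreasing_sequence(n):
--     w = []
--     base = 1
--
--     for _ in range(n):
--         next_element = base + sum(w)
--         w.append(next_element)
--         base = next_element + 1
--
--     return w
-- ===== SOURCE B (Python) =====
-- def build_superincreasing_sequence(n):
--     if n <= 0:
--         return []
--     if n == 1:
--         return [1]
--     w = [1, 3]
--     a, b = 1, 3
--     for _ in range(n - 2):
--         a, b = b, 3 * b - a
--         w.append(b)
--     return w
-- ===== Notes on version B (the rewrite author's own statement) =====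
-- stated objective: faster
-- what changed: Replaces the running sum over the whole prefix (sum(w) each iteration) by the closed linear recurrence w[k] = 3*w[k-1] - w[k-2] with explicitly seeded first two terms, keeping only the last two values.
import Mathlib
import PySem

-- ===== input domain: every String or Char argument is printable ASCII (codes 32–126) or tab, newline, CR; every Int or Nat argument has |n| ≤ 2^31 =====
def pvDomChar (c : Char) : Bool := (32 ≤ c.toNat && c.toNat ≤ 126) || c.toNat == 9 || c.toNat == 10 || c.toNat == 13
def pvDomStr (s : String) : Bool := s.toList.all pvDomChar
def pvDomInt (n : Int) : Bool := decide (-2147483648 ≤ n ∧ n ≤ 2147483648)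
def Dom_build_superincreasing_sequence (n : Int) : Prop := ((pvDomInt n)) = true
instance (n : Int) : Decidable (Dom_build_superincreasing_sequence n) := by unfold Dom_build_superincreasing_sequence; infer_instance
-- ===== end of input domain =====

-- B replaces A's per-step sum over the whole prefix by the linear recurrence
-- w[k] = 3*w[k-1] - w[k-2] with explicitly seeded first two terms (objective: faster).

-- ===== PORT A =====
-- state = (w, base); each step: next = base + sum(w); w.append(next); base = next + 1
def build_superincreasing_sequence (n : Int) : List Int :=
  ((PySem.List.pyRange 0 n 1).foldl
    (fun (st : List Int × Int) _ =>
      let next := st.2 + st.1.sum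
      (st.1 ++ [next], next + 1))
    ([], 1)).1

-- ===== PORT B =====
-- the recurrence loop of Source B, keeping the last two values (a, b)
def pvAltLoop (k : Nat) (a b : Int) : List Int :=
  match k with
  | 0 => []
  | k + 1 => (3 * b - a) :: pvAltLoop k b (3 * b - a)

def build_superincreasing_sequence_alt (n : Int) : List Int :=
  if n ≤ 0 then []
  else if n = 1 then [1]
  else [1, 3] ++ pvAltLoop (n - 2).toNat 1 3

-- ===== PRECONDITION & SPEC =====
def Spec_build_superincreasing_sequence (n : Int) (out : List Int) : Prop := out = build_superincreasing_sequence_alt n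
instance (n : Int) (out : List Int) : Decidable (Spec_build_superincreasing_sequence n out) := by unfold Spec_build_superincreasing_sequence; infer_instance

-- ===== CLAIM (what is proved, stated in full; the proofs are below) =====
def Claim_equal_build_superincreasing_sequence : Prop := ∀ (n : Int), Dom_build_superincreasing_sequence n → Spec_build_superincreasing_sequence n (build_superincreasing_sequence n)

-- ===== LEMMAS AND PROOFS =====

-- A's loop body, named for the proofs
def pvAStep (st : List Int × Int) (_x : Int) : List Int × Int :=
  let next := st.2 + st.1.sum
  (st.1 ++ [next], next + 1)

-- k iterations of A's loop body (the element is ignored by pvAStep)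
def pvIter (k : Nat) (st : List Int × Int) : List Int × Int :=
  match k with
  | 0 => st
  | k + 1 => pvIter k (pvAStep st 0)

-- the final "b" value of pvAltLoop, needed to track A's base through the induction
def pvFinB (k : Nat) (a b : Int) : Int :=
  match k with
  | 0 => b
  | k + 1 => pvFinB k b (3 * b - a)

-- A's step ignores the list element, so its fold depends only on the length
theorem pvFold_iter (l : List Int) (st : List Int × Int) :
    l.foldl pvAStep st = pvIter l.length st := by
  induction l generalizing st with
  | nil => rfl
  | cons x xs ih => simpa [pvIter] using ih (pvAStep st 0)

-- core invariant: with sum w = 2*b - a - 1 and base = b + 1, k more A-steps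
-- append exactly pvAltLoop k a b and leave base = pvFinB k a b + 1
theorem pvLoop_inv (k : Nat) : ∀ (a b : Int) (w : List Int), w.sum = 2 * b - a - 1 →
    pvIter k (w, b + 1) = (w ++ pvAltLoop k a b, pvFinB k a b + 1) := by
  induction k with
  | zero => intro a b w _; simp [pvIter, pvAltLoop, pvFinB]
  | succ k ih =>
      intro a b w hs
      have hstep : pvAStep (w, b + 1) 0 = (w ++ [3 * b - a], (3 * b - a) + 1) := by
        simp only [pvAStep, Prod.mk.injEq]
        refine ⟨by rw [hs]; ring_nf, by rw [hs]; ring⟩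
      have hs' : (w ++ [3 * b - a]).sum = 2 * (3 * b - a) - b - 1 := by
        simp [List.sum_append]; omega
      show pvIter k (pvAStep (w, b + 1) 0) = _
      rw [hstep, ih b (3 * b - a) (w ++ [3 * b - a]) hs']
      simp [pvAltLoop, pvFinB]

theorem build_superincreasing_sequence_spec : Claim_equal_build_superincreasing_sequence := by
  intro n _
  unfold Spec_build_superincreasing_sequence
  unfold build_superincreasing_sequence build_superincreasing_sequence_alt
  rw [show (fun (st : List Int × Int) (_ : Int) =>
        let next := st.2 + st.1.sum
        (st.1 ++ [next], next + 1)) = pvAStep from rfl]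
  rw [pvFold_iter, PySem.List.length_pyRange_one]
  by_cases h0 : n ≤ 0
  · have : (n - 0).toNat = 0 := by omega
    rw [this]
    simp [pvIter, h0]
  · by_cases h1 : n = 1
    · subst h1; decide
    · have h2 : 2 ≤ n := by omega
      have hk : (n - 0).toNat = (n - 2).toNat + 2 := by omega
      rw [hk]
      have h12 : pvIter ((n - 2).toNat + 2) (([] : List Int), 1) =
          pvIter (n - 2).toNat ([1, 3], 4) := by
        show pvIter ((n - 2).toNat) (pvAStep (pvAStep ([], 1) 0) 0) = _
        norm_num [pvAStep]
      rw [h12, show (4 : Int) = 3 + 1 from rfl,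
        pvLoop_inv (n - 2).toNat 1 3 [1, 3] (by decide)]
      simp [h0, h1]

-- ===== VERDICT (by name: the statement is the Claim_ definition above) =====
-- (theorem above; stated here by name)
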